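-- pv_equiv track=rewrite | github.com/sam-dev99/BDC_HW2 | G064HW2.py | countTriangles2
-- ===== SOURCE A (Python) =====
-- import collections
--
-- def countTriangles2(colors_tuple, edges, rand_a, rand_b, p, num_colors):
--     #We assume colors_tuple to be already sorted by increasing colors. Just transform in a list for simplicity
--     colors = [int(c) for c in colors_tuple]
--     #Create a dictionary for adjacency list
--     neighbors = collections.defaultdict(set)
--     #Creare a dictionary for storing node colors
--     node_colors = dict()
--     for edge in edges:
--         u, v = edge
--         u = int(u)
--         v = int(v)
--         node_colors[u]= ((rand_a*u+rand_b)%p)%num_colors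
--         node_colors[v]= ((rand_a*v+rand_b)%p)%num_colors
--         neighbors[u].add(v)
--         neighbors[v].add(u)
--
--     # Initialize the triangle count to zero
--     triangle_count = 0
--
--     # Iterate over each vertex in the graph
--     for v in neighbors:
--         # Iterate over each pair of neighbors of v
--         for u in neighbors[v]:
--             if u > v:
--                 for w in neighbors[u]:
--                     # If w is also a neighbor of v, then we have a triangle
--                     if w > u and w in neighbors[v]:
--                         # Sort colors by increasing values
--                         triangle_colors = sorted((node_colors[u], node_colors[v], node_colors[w]))
--                         # If triangle has the right colors, count it.
--                         if colors==triangle_colors: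
--                             triangle_count += 1
--     # Return the total number of triangles in the graph
--     return triangle_count
-- ===== SOURCE B (Python) =====
-- def countTriangles2(colors_tuple, edges, rand_a, rand_b, p, num_colors):
--     # Brute-force triple enumeration: collect the vertex set and a symmetric
--     # edge set once, then test every ordered vertex triple a < b < c for the
--     # three edges and the color match. No adjacency structure is built.
--     target = [int(c) for c in colors_tuple]
--     verts = set()
--     edge_set = set()
--     for e in edges:
--         u, v = int(e[0]), int(e[1])
--         verts.add(u)
--         verts.add(v)
--         edge_set.add((u, v))
--         edge_set.add((v, u))
--
--     def col(x):
--         return ((rand_a * x + rand_b) % p) % num_colors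
--
--     count = 0
--     for a in verts:
--         for b in verts:
--             if a < b and (a, b) in edge_set:
--                 for c in verts:
--                     if b < c and (a, c) in edge_set and (b, c) in edge_set \
--                             and sorted((col(a), col(b), col(c))) == target:
--                         count += 1
--     return count
-- ===== Notes on version B (the rewrite author's own statement) =====
-- stated objective: simpler
-- what changed: B drops A's adjacency-dictionary traversal entirely: it builds one vertex set and one symmetric edge set, then enumerates every ordered vertex triple a<b<c and tests the three closing edges plus the color match directly (triple enumeration over the vertex set instead of walking neighbour sets).
import Mathlib
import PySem

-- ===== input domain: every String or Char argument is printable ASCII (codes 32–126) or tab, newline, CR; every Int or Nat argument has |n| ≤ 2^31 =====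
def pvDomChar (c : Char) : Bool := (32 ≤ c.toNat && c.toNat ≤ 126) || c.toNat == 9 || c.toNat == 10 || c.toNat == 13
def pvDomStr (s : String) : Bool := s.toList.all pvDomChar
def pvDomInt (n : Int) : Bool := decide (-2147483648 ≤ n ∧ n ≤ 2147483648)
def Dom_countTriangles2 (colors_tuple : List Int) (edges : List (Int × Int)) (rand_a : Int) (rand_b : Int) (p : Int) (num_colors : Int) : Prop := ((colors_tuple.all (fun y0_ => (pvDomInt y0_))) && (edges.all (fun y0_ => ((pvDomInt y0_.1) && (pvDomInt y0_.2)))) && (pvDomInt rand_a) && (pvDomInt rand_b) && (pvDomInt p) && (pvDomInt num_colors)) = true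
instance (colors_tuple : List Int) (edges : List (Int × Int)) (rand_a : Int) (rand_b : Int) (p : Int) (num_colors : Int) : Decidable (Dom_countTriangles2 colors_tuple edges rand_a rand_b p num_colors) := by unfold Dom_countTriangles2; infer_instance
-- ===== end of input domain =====

-- B replaces A's adjacency-dictionary traversal by plain triple enumeration over the
-- vertex set with direct edge-set tests (simpler decomposition; same exact count).

-- ===== PORT A =====
-- one step of A's "for edge in edges" loop: update (neighbors, node_colors)
def pvA_build (rand_a rand_b p num_colors : Int)
    (st : PySem.Dict Int (PySem.Set Int) × PySem.Dict Int Int) (e : Int × Int) :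
    PySem.Dict Int (PySem.Set Int) × PySem.Dict Int Int :=
  let u := e.1
  let v := e.2
  let nc := (st.2.insert u (PySem.Int.mod (PySem.Int.mod (rand_a * u + rand_b) p) num_colors)).insert
      v (PySem.Int.mod (PySem.Int.mod (rand_a * v + rand_b) p) num_colors)
  let nb := st.1.insert u (PySem.Set.add (st.1.getD u PySem.Set.empty) v)
  let nb := nb.insert v (PySem.Set.add (nb.getD v PySem.Set.empty) u)
  (nb, nc)

-- node_colors[x] is read with getD: every vertex scanned is a key, so it equals Python's d[x]
def countTriangles2 (colors_tuple : List Int) (edges : List (Int × Int)) (rand_a : Int) (rand_b : Int) (p : Int) (num_colors : Int) : Int :=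
  let colors := colors_tuple.map (fun c => c)
  let st := edges.foldl (pvA_build rand_a rand_b p num_colors) (PySem.Dict.empty, PySem.Dict.empty)
  let neighbors := st.1
  let node_colors := st.2
  neighbors.keys.foldl (fun acc v =>
    (neighbors.getD v PySem.Set.empty).foldl (fun acc u =>
      if u > v then
        (neighbors.getD u PySem.Set.empty).foldl (fun acc w =>
          if w > u ∧ w ∈ neighbors.getD v PySem.Set.empty then
            if colors = PySem.List.sorted [node_colors.getD u 0, node_colors.getD v 0, node_colors.getD w 0] (fun x => x)
            then acc + 1 else acc
          else acc) acc
      else acc) acc) 0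

-- ===== PORT B =====
def pvColor (rand_a rand_b p num_colors x : Int) : Int :=
  PySem.Int.mod (PySem.Int.mod (rand_a * x + rand_b) p) num_colors

-- one step of B's loop: record both endpoints and the edge in both orientations
def pvB_build (st : PySem.Set Int × PySem.Set (Int × Int)) (e : Int × Int) :
    PySem.Set Int × PySem.Set (Int × Int) :=
  (PySem.Set.add (PySem.Set.add st.1 e.1) e.2,
   PySem.Set.add (PySem.Set.add st.2 (e.1, e.2)) (e.2, e.1))

-- the triple loops consume the vertex Set only to accumulate an order-independent count
def countTriangles2_alt (colors_tuple : List Int) (edges : List (Int × Int)) (rand_a : Int) (rand_b : Int) (p : Int) (num_colors : Int) : Int :=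
  let target := colors_tuple.map (fun c => c)
  let st := edges.foldl pvB_build (PySem.Set.empty, PySem.Set.empty)
  let verts := st.1
  let es := st.2
  verts.foldl (fun acc a =>
    verts.foldl (fun acc b =>
      if a < b ∧ (a, b) ∈ es then
        verts.foldl (fun acc c =>
          if b < c ∧ (a, c) ∈ es ∧ (b, c) ∈ es ∧
              PySem.List.sorted [pvColor rand_a rand_b p num_colors a, pvColor rand_a rand_b p num_colors b, pvColor rand_a rand_b p num_colors c] (fun x => x) = target
          then acc + 1 else acc) acc
      else acc) acc) 0

-- ===== PRECONDITION & SPEC =====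
-- A evaluates % p and % num_colors for every edge endpoint: p = 0 or num_colors = 0
-- with a nonempty edge list raises ZeroDivisionError in Python, so it is excluded.
def Pre_countTriangles2 (colors_tuple : List Int) (edges : List (Int × Int)) (rand_a : Int) (rand_b : Int) (p : Int) (num_colors : Int) : Prop :=
  edges = [] ∨ (p ≠ 0 ∧ num_colors ≠ 0)
instance (colors_tuple : List Int) (edges : List (Int × Int)) (rand_a : Int) (rand_b : Int) (p : Int) (num_colors : Int) : Decidable (Pre_countTriangles2 colors_tuple edges rand_a rand_b p num_colors) := by unfold Pre_countTriangles2; infer_instance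
def pvWitness_countTriangles2 : List Int × (List (Int × Int)) × Int × Int × Int × Int :=
  ([0, 0, 0], [(1, 2), (2, 3), (1, 3)], 1, 0, 5, 1)

def Spec_countTriangles2 (colors_tuple : List Int) (edges : List (Int × Int)) (rand_a : Int) (rand_b : Int) (p : Int) (num_colors : Int) (out : Int) : Prop := out = countTriangles2_alt colors_tuple edges rand_a rand_b p num_colors
instance (colors_tuple : List Int) (edges : List (Int × Int)) (rand_a : Int) (rand_b : Int) (p : Int) (num_colors : Int) (out : Int) : Decidable (Spec_countTriangles2 colors_tuple edges rand_a rand_b p num_colors out) := by unfold Spec_countTriangles2; infer_instance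

-- ===== CLAIM (what is proved, stated in full; the proofs are below) =====
def Claim_equal_countTriangles2 : Prop := ∀ (colors_tuple : List Int) (edges : List (Int × Int)) (rand_a : Int) (rand_b : Int) (p : Int) (num_colors : Int), Dom_countTriangles2 colors_tuple edges rand_a rand_b p num_colors → Pre_countTriangles2 colors_tuple edges rand_a rand_b p num_colors → Spec_countTriangles2 colors_tuple edges rand_a rand_b p num_colors (countTriangles2 colors_tuple edges rand_a rand_b p num_colors)

-- ===== LEMMAS AND PROOFS =====

-- proof-side abbreviations
def pvAdj (edges : List (Int × Int)) (x y : Int) : Bool :=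
  edges.any (fun e => (e.1 == x && e.2 == y) || (e.1 == y && e.2 == x))

def pvVerts (edges : List (Int × Int)) : List Int := edges.flatMap (fun e => [e.1, e.2])

def pvU (edges : List (Int × Int)) : Finset Int := (pvVerts edges).toFinset

-- the common spec: number of ordered triples v < u < w forming a triangle with matching colors
def pvInd (colors_tuple : List Int) (edges : List (Int × Int)) (rand_a rand_b p num_colors v u w : Int) : Int :=
  if v < u ∧ u < w ∧ pvAdj edges v u = true ∧ pvAdj edges u w = true ∧ pvAdj edges v w = true ∧
      colors_tuple = PySem.List.sorted [pvColor rand_a rand_b p num_colors u, pvColor rand_a rand_b p num_colors v, pvColor rand_a rand_b p num_colors w] (fun x => x)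
  then 1 else 0

def pvSpec (colors_tuple : List Int) (edges : List (Int × Int)) (rand_a rand_b p num_colors : Int) : Int :=
  ∑ v ∈ pvU edges, ∑ u ∈ pvU edges, ∑ w ∈ pvU edges, pvInd colors_tuple edges rand_a rand_b p num_colors v u w

theorem pvAdj_nil (x y : Int) : pvAdj [] x y = false := rfl

theorem pvAdj_cons (e : Int × Int) (l : List (Int × Int)) (x y : Int) :
    pvAdj (e :: l) x y = (((e.1 == x && e.2 == y) || (e.1 == y && e.2 == x)) || pvAdj l x y) := by
  simp [pvAdj]

theorem pvAdj_mem_verts {l : List (Int × Int)} {x y : Int} (h : pvAdj l x y = true) :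
    x ∈ pvVerts l ∧ y ∈ pvVerts l := by
  simp only [pvAdj, List.any_eq_true, Bool.or_eq_true, Bool.and_eq_true, beq_iff_eq] at h
  simp only [pvVerts, List.mem_flatMap, List.mem_cons]
  obtain ⟨e, he, h | h⟩ := h <;> exact ⟨⟨e, he, by tauto⟩, ⟨e, he, by tauto⟩⟩

-- generic fold flattening
theorem pv_foldl_acc_add {α : Type} (f : Int → α → Int) (g : α → Int)
    (h : ∀ acc x, f acc x = acc + g x) (l : List α) (a : Int) :
    l.foldl f a = a + (l.map g).sum := by
  have : f = fun acc x => acc + g x := funext fun acc => funext fun x => h acc x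
  rw [this, PySem.List.foldl_add]

theorem pv_sorted_swap (x y z : Int) :
    PySem.List.sorted [x, y, z] (fun t => t) = PySem.List.sorted [y, x, z] (fun t => t) := by
  apply PySem.List.sorted_id_eq_of_perm_of_pairwise
  · exact (PySem.List.sorted_perm [y, x, z] (fun t => t) false).trans (List.Perm.swap x y [z])
  · exact PySem.List.sorted_pairwise [y, x, z] (fun t => t)

-- ===== A-side invariants =====

theorem pvVerts_cons (e : Int × Int) (l : List (Int × Int)) :
    pvVerts (e :: l) = e.1 :: e.2 :: pvVerts l := by
  simp [pvVerts]

theorem pvA_build_mem (ra rb p nc : Int) (st : PySem.Dict Int (PySem.Set Int) × PySem.Dict Int Int)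
    (e : Int × Int) (v w : Int) :
    (w ∈ (pvA_build ra rb p nc st e).1.getD v PySem.Set.empty) ↔
      (w ∈ st.1.getD v PySem.Set.empty ∨ (v = e.1 ∧ w = e.2) ∨ (v = e.2 ∧ w = e.1)) := by
  simp only [pvA_build, PySem.Dict.getD_insert]
  split_ifs <;> subst_vars <;> simp [PySem.Set.mem_add, *]

theorem pvA_mem (ra rb p nc : Int) (l : List (Int × Int))
    (st : PySem.Dict Int (PySem.Set Int) × PySem.Dict Int Int) (v w : Int) :
    (w ∈ (l.foldl (pvA_build ra rb p nc) st).1.getD v PySem.Set.empty) ↔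
      (w ∈ st.1.getD v PySem.Set.empty ∨ pvAdj l v w = true) := by
  induction l generalizing st with
  | nil => simp [pvAdj_nil]
  | cons e l ih =>
    rw [List.foldl_cons, ih, pvA_build_mem, pvAdj_cons]
    simp only [Bool.or_eq_true, Bool.and_eq_true, beq_iff_eq]
    tauto

theorem pvA_keys (ra rb p nc : Int) (l : List (Int × Int))
    (st : PySem.Dict Int (PySem.Set Int) × PySem.Dict Int Int) (x : Int) :
    (x ∈ (l.foldl (pvA_build ra rb p nc) st).1.keys) ↔ (x ∈ st.1.keys ∨ x ∈ pvVerts l) := by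
  induction l generalizing st with
  | nil => simp [pvVerts]
  | cons e l ih =>
    rw [List.foldl_cons, ih, pvVerts_cons]
    simp only [pvA_build, PySem.Dict.mem_keys_insert, List.mem_cons]
    tauto

theorem pvA_col (ra rb p nc : Int) (l : List (Int × Int))
    (st : PySem.Dict Int (PySem.Set Int) × PySem.Dict Int Int) (x : Int) :
    (l.foldl (pvA_build ra rb p nc) st).2.getD x 0 =
      if x ∈ pvVerts l then pvColor ra rb p nc x else st.2.getD x 0 := by
  induction l generalizing st with
  | nil => simp [pvVerts]
  | cons e l ih =>
    rw [List.foldl_cons, ih, pvVerts_cons]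
    simp only [pvA_build, PySem.Dict.getD_insert, List.mem_cons]
    by_cases hx : x ∈ pvVerts l <;> split_ifs <;> subst_vars <;> simp_all [pvColor]

theorem pvA_nodup_keys (ra rb p nc : Int) (l : List (Int × Int))
    (st : PySem.Dict Int (PySem.Set Int) × PySem.Dict Int Int) (h : st.1.keys.Nodup) :
    (l.foldl (pvA_build ra rb p nc) st).1.keys.Nodup := by
  induction l generalizing st with
  | nil => exact h
  | cons e l ih =>
    exact ih _ (PySem.Dict.nodup_keys_insert _ _ _ (PySem.Dict.nodup_keys_insert _ _ _ h))

theorem pvA_nodup_val (ra rb p nc : Int) (l : List (Int × Int))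
    (st : PySem.Dict Int (PySem.Set Int) × PySem.Dict Int Int)
    (h : ∀ v, (st.1.getD v PySem.Set.empty).Nodup) (v : Int) :
    ((l.foldl (pvA_build ra rb p nc) st).1.getD v PySem.Set.empty).Nodup := by
  induction l generalizing st with
  | nil => exact h v
  | cons e l ih =>
    refine ih _ (fun x => ?_)
    have h2 : ∀ y, ((st.1.insert e.1 (PySem.Set.add (st.1.getD e.1 PySem.Set.empty) e.2)).getD y
        PySem.Set.empty).Nodup := by
      intro y; rw [PySem.Dict.getD_insert]; split_ifs
      · exact PySem.Set.nodup_add _ _ (h _)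
      · exact h _
    simp only [pvA_build]
    rw [PySem.Dict.getD_insert]; split_ifs
    · exact PySem.Set.nodup_add _ _ (h2 _)
    · exact h2 _

-- ===== B-side invariants =====

theorem pvB_mem_verts (l : List (Int × Int)) (st : PySem.Set Int × PySem.Set (Int × Int)) (x : Int) :
    (x ∈ (l.foldl pvB_build st).1) ↔ (x ∈ st.1 ∨ x ∈ pvVerts l) := by
  induction l generalizing st with
  | nil => simp [pvVerts]
  | cons e l ih =>
    rw [List.foldl_cons, ih, pvVerts_cons]
    simp only [pvB_build, PySem.Set.mem_add, List.mem_cons]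
    tauto

theorem pvB_mem_es (l : List (Int × Int)) (st : PySem.Set Int × PySem.Set (Int × Int)) (a b : Int) :
    ((a, b) ∈ (l.foldl pvB_build st).2) ↔ ((a, b) ∈ st.2 ∨ pvAdj l a b = true) := by
  induction l generalizing st with
  | nil => simp [pvAdj_nil]
  | cons e l ih =>
    rw [List.foldl_cons, ih, pvAdj_cons]
    simp only [pvB_build, PySem.Set.mem_add, Bool.or_eq_true, Bool.and_eq_true, beq_iff_eq,
      Prod.mk.injEq]
    tauto

theorem pvB_nodup_verts (l : List (Int × Int)) (st : PySem.Set Int × PySem.Set (Int × Int))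
    (h : st.1.Nodup) : (l.foldl pvB_build st).1.Nodup := by
  induction l generalizing st with
  | nil => exact h
  | cons e l ih =>
    exact ih _ (PySem.Set.nodup_add _ _ (PySem.Set.nodup_add _ _ h))

-- ===== A = spec =====

theorem pvA_eq_spec (ct : List Int) (edges : List (Int × Int)) (ra rb p nc : Int) :
    countTriangles2 ct edges ra rb p nc = pvSpec ct edges ra rb p nc := by
  simp only [countTriangles2]
  set nb := (List.foldl (pvA_build ra rb p nc) (PySem.Dict.empty, PySem.Dict.empty) edges).1 with hnb
  set ncd := (List.foldl (pvA_build ra rb p nc) (PySem.Dict.empty, PySem.Dict.empty) edges).2 with hncd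
  have hmem : ∀ v w, (w ∈ nb.getD v PySem.Set.empty) ↔ pvAdj edges v w = true := by
    intro v w
    rw [hnb, pvA_mem]
    simp [PySem.Dict.getD_empty]
  have hkeys : ∀ x, (x ∈ nb.keys) ↔ x ∈ pvVerts edges := by
    intro x
    rw [hnb, pvA_keys]
    simp [PySem.Dict.keys_empty]
  have hcol : ∀ x, x ∈ pvVerts edges → ncd.getD x 0 = pvColor ra rb p nc x := by
    intro x hx
    rw [hncd, pvA_col, if_pos hx]
  have hnodK : nb.keys.Nodup := pvA_nodup_keys _ _ _ _ _ _ (by simp [PySem.Dict.keys_empty])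
  have hnodV : ∀ v, (nb.getD v PySem.Set.empty).Nodup := fun v =>
    pvA_nodup_val _ _ _ _ _ _ (by simp [PySem.Dict.getD_empty]) v
  -- flatten the three folds into sums
  have h1 : ∀ (v : Int) (acc : Int) (S : List Int),
      S.foldl (fun acc u =>
        if u > v then
          (nb.getD u PySem.Set.empty).foldl (fun acc w =>
            if w > u ∧ w ∈ nb.getD v PySem.Set.empty then
              if ct.map (fun c => c) = PySem.List.sorted [ncd.getD u 0, ncd.getD v 0, ncd.getD w 0] (fun x => x)
              then acc + 1 else acc
            else acc) acc
        else acc) acc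
      = acc + (S.map (fun u => if u > v then
          ((nb.getD u PySem.Set.empty).map (fun w =>
            if (w > u ∧ w ∈ nb.getD v PySem.Set.empty) ∧
                ct.map (fun c => c) = PySem.List.sorted [ncd.getD u 0, ncd.getD v 0, ncd.getD w 0] (fun x => x)
            then (1 : Int) else 0)).sum
          else 0)).sum := by
    intro v acc S
    refine pv_foldl_acc_add _ _ ?_ _ _
    intro acc u
    by_cases huv : u > v
    · simp only [if_pos huv]
      refine pv_foldl_acc_add _ _ ?_ _ _
      intro acc w
      split_ifs <;> first | rfl | omega | tauto
    · simp [huv]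
  rw [pv_foldl_acc_add _ _ (fun acc v => h1 v acc (nb.getD v PySem.Set.empty)) _ _, zero_add]
  -- lists to finsets
  rw [← List.sum_toFinset _ hnodK]
  have hKU : nb.keys.toFinset = pvU edges := by
    ext x; simp [List.mem_toFinset, hkeys, pvU]
  have hNU : ∀ v, (nb.getD v PySem.Set.empty).toFinset
      = (pvU edges).filter (fun u => pvAdj edges v u = true) := by
    intro v
    ext u
    simp only [List.mem_toFinset, hmem, Finset.mem_filter, pvU]
    constructor
    · intro h; exact ⟨(pvAdj_mem_verts h).2, h⟩
    · tauto
  rw [hKU]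
  unfold pvSpec
  refine Finset.sum_congr rfl ?_
  intro v hv
  rw [← List.sum_toFinset _ (hnodV v), hNU v, Finset.sum_filter]
  refine Finset.sum_congr rfl ?_
  intro u hu
  by_cases h1' : pvAdj edges v u = true
  · by_cases h2' : u > v
    · simp only [if_pos h1', if_pos h2']
      rw [← List.sum_toFinset _ (hnodV u), hNU u, Finset.sum_filter]
      refine Finset.sum_congr rfl ?_
      intro w hw
      have hvV : v ∈ pvVerts edges := by simpa [pvU, List.mem_toFinset] using hv
      have huV : u ∈ pvVerts edges := by simpa [pvU, List.mem_toFinset] using hu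
      have hwV : w ∈ pvVerts edges := by simpa [pvU, List.mem_toFinset] using hw
      simp only [hmem, hcol v hvV, hcol u huV, hcol w hwV, List.map_id', pvInd]
      split_ifs <;> first | rfl | tauto
    · simp only [if_pos h1', if_neg h2']
      symm
      refine Finset.sum_eq_zero ?_
      intro w hw
      simp only [pvInd]
      rw [if_neg]; tauto
  · simp only [if_neg h1']
    symm
    refine Finset.sum_eq_zero ?_
    intro w hw
    simp only [pvInd]
    rw [if_neg]; tauto

-- ===== B = spec =====

theorem pvB_eq_spec (ct : List Int) (edges : List (Int × Int)) (ra rb p nc : Int) :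
    countTriangles2_alt ct edges ra rb p nc = pvSpec ct edges ra rb p nc := by
  simp only [countTriangles2_alt]
  set st := List.foldl pvB_build (PySem.Set.empty, PySem.Set.empty) edges with hst
  have hv : ∀ x, (x ∈ st.1) ↔ x ∈ pvVerts edges := by
    intro x
    rw [hst, pvB_mem_verts]
    simp [PySem.Set.empty]
  have he : ∀ a b, ((a, b) ∈ st.2) ↔ pvAdj edges a b = true := by
    intro a b
    rw [hst, pvB_mem_es]
    simp [PySem.Set.empty]
  have hn : st.1.Nodup := pvB_nodup_verts _ _ (by simp [PySem.Set.empty])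
  -- flatten the three folds into sums
  have hflat : ∀ (acc : Int),
      st.1.foldl (fun acc a =>
        st.1.foldl (fun acc b =>
          if a < b ∧ (a, b) ∈ st.2 then
            st.1.foldl (fun acc c =>
              if b < c ∧ (a, c) ∈ st.2 ∧ (b, c) ∈ st.2 ∧
                  PySem.List.sorted [pvColor ra rb p nc a, pvColor ra rb p nc b, pvColor ra rb p nc c] (fun x => x) = ct.map (fun x => x)
              then acc + 1 else acc) acc
          else acc) acc) acc
      = acc + (st.1.map (fun a =>
          (st.1.map (fun b => if a < b ∧ (a, b) ∈ st.2 then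
            (st.1.map (fun c =>
              if b < c ∧ (a, c) ∈ st.2 ∧ (b, c) ∈ st.2 ∧
                  PySem.List.sorted [pvColor ra rb p nc a, pvColor ra rb p nc b, pvColor ra rb p nc c] (fun x => x) = ct.map (fun x => x)
              then (1 : Int) else 0)).sum
            else 0)).sum)).sum := by
    intro acc
    refine pv_foldl_acc_add _ _ ?_ _ _
    intro acc a
    refine pv_foldl_acc_add _ _ ?_ _ _
    intro acc b
    by_cases hab : a < b ∧ (a, b) ∈ st.2
    · simp only [if_pos hab]
      refine pv_foldl_acc_add _ _ ?_ _ _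
      intro acc c
      split_ifs <;> omega
    · simp [hab]
  rw [hflat 0, zero_add]
  -- lists to finsets
  have hVU : st.1.toFinset = pvU edges := by
    ext x; simp [List.mem_toFinset, hv, pvU]
  rw [← List.sum_toFinset _ hn, hVU]
  unfold pvSpec
  refine Finset.sum_congr rfl ?_
  intro a _
  rw [← List.sum_toFinset _ hn, hVU]
  refine Finset.sum_congr rfl ?_
  intro b _
  by_cases hab : a < b ∧ (a, b) ∈ st.2
  · simp only [if_pos hab]
    rw [← List.sum_toFinset _ hn, hVU]
    refine Finset.sum_congr rfl ?_
    intro c _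
    rw [pv_sorted_swap]
    simp only [he, List.map_id', pvInd]
    have hab' := (he a b).mp hab.2
    exact if_congr ⟨fun h => ⟨hab.1, h.1, hab', h.2.2.1, h.2.1, h.2.2.2.symm⟩,
      fun g => ⟨g.2.1, g.2.2.2.2.1, g.2.2.2.1, g.2.2.2.2.2.symm⟩⟩ rfl rfl
  · simp only [if_neg hab]
    symm
    refine Finset.sum_eq_zero ?_
    intro c _
    simp only [pvInd]
    rw [if_neg]
    rintro ⟨h1, _, h3, _⟩
    exact hab ⟨h1, (he a b).mpr h3⟩

-- ===== VERDICT (by name: the statement is the Claim_ definition above) =====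
theorem countTriangles2_spec : Claim_equal_countTriangles2 := by
  intro ct edges ra rb p nc _ _
  unfold Spec_countTriangles2
  rw [pvA_eq_spec, pvB_eq_spec]
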